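-- pv_equiv track=rewrite | github.com/Chrisandre1886/Estructura-De-Datos | ADA3 - MetOrdenaExt/ADA3_MET.py | mezcla_equilibrada_sort
-- ===== SOURCE A (Python) =====
-- def mezcla_equilibrada_sort(arr):
--     """Método de Mezcla Equilibrada (Merge Sort)"""
--     steps = []
--
--     def merge(left, right):
--         result = []
--         i = j = 0
--         while i < len(left) and j < len(right):
--             if left[i] <= right[j]:
--                 result.append(left[i])
--                 i += 1
--             else:
--                 result.append(right[j])
--                 j += 1
--         result.extend(left[i:])
--         result.extend(right[j:])
--         return result
--
--     def merge_sort(arr):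
--         if len(arr) <= 1:
--             return arr
--
--         mid = len(arr) // 2
--         left = merge_sort(arr[:mid])
--         right = merge_sort(arr[mid:])
--
--         merged = merge(left, right)
--         steps.append(merged.copy())
--         return merged
--
--     merge_sort(arr.copy())
--     return steps
-- ===== SOURCE B (Python) =====
-- def _merge(left, right):
--     result = []
--     i = j = 0
--     while i < len(left) and j < len(right):
--         if left[i] <= right[j]:
--             result.append(left[i])
--             i += 1
--         else:
--             result.append(right[j])
--             j += 1
--     result.extend(left[i:])
--     result.extend(right[j:])
--     return result
--
--
-- def mezcla_equilibrada_sort(arr):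
--     """Merge sort recorded steps, computed by an explicit work-stack machine
--     instead of recursion (same top-down post-order of merges)."""
--     steps = []
--     work = [("sort", arr.copy())]
--     vals = []
--     while work:
--         tag, seg = work.pop()
--         if tag == "sort":
--             if len(seg) <= 1:
--                 vals.append(seg)
--             else:
--                 mid = len(seg) // 2
--                 work.append(("merge", None))
--                 work.append(("sort", seg[mid:]))
--                 work.append(("sort", seg[:mid]))
--         else:
--             right = vals.pop()
--             left = vals.pop()
--             merged = _merge(left, right)
--             steps.append(merged)
--             vals.append(merged)
--     return steps
-- ===== Notes on version B (the rewrite author's own statement) =====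
-- stated objective: alternative
-- what changed: The recursive merge_sort (with a closure-captured steps list) is replaced by an iterative work-stack machine: 'sort' tasks expand into left/right halves plus a deferred 'merge' task, and a value stack holds sorted halves, reproducing the same post-order of recorded merges without recursion.
import Mathlib
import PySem

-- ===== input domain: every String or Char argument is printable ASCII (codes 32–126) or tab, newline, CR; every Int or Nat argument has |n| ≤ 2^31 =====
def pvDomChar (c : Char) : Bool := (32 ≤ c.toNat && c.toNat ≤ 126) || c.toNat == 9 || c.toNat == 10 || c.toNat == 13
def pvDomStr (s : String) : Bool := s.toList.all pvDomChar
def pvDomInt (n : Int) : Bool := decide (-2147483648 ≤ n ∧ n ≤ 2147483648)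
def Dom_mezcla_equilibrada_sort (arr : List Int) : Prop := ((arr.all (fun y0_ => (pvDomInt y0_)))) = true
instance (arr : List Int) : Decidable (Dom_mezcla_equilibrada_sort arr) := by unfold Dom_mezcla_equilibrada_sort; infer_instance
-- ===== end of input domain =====

-- B replaces the recursion by an explicit work-stack machine with the same post-order of merges (objective: alternative decomposition, same cost).

-- ===== PORT A =====
-- merge(left, right): the two index pointers i, j become the consumed prefixes of
-- the two lists; left[i:] / right[j:] are exactly the unconsumed suffixes — exact.
def pvMergeA : List Int → List Int → List Int
  | [], right => right
  | left, [] => left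
  | a :: left, b :: right =>
      if a ≤ b then a :: pvMergeA left (b :: right)
      else b :: pvMergeA (a :: left) right

-- merge_sort: the closure-mutated `steps` list is threaded as the second component,
-- appended in exactly the order the Python appends (left's steps, right's, then merged).
def pvMsortA (arr : List Int) : List Int × List (List Int) :=
  if arr.length ≤ 1 then (arr, [])
  else
    let mid := arr.length / 2
    let l := pvMsortA (arr.take mid)   -- arr[:mid], mid = len(arr)//2 ≥ 0 — exact
    let r := pvMsortA (arr.drop mid)   -- arr[mid:]
    let merged := pvMergeA l.1 r.1
    (merged, l.2 ++ r.2 ++ [merged])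
termination_by arr.length
decreasing_by
  · simp_all; omega
  · simp_all; omega

def mezcla_equilibrada_sort (arr : List Int) : List (List Int) := (pvMsortA arr).2

-- ===== PORT B =====
inductive PvTask where
  | sortT (seg : List Int)
  | mergeT
deriving Repr, DecidableEq

-- _merge in Source B: same two-pointer loop, ported the same way (exact).
def pvMergeB : List Int → List Int → List Int
  | [], right => right
  | left, [] => left
  | a :: left, b :: right =>
      if a ≤ b then a :: pvMergeB left (b :: right)
      else b :: pvMergeB (a :: left) right

def pvTaskWeight : PvTask → Nat
  | PvTask.sortT seg => seg.length ^ 3 + 1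
  | PvTask.mergeT => 1

-- termination measure lemma for the machine: a split strictly shrinks the cubes
theorem pvCubeSplit (a b : Nat) (ha : 1 ≤ a) (hb : 1 ≤ b) : a ^ 3 + b ^ 3 + 3 ≤ (a + b) ^ 3 := by
  nlinarith [ha, hb, Nat.mul_le_mul (Nat.mul_le_mul ha ha) hb, Nat.mul_le_mul (Nat.mul_le_mul ha hb) hb]

-- the while loop over the work stack; Python pushes/pops at the list's end,
-- rendered as a cons-stack whose head is the top — exact.
def pvLoop (work : List PvTask) (vals steps : List (List Int)) : List (List Int) :=
  match work, vals, steps with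
  | [], _, steps => steps
  | PvTask.sortT seg :: work, vals, steps =>
      if seg.length ≤ 1 then pvLoop work (seg :: vals) steps
      else
        let mid := seg.length / 2
        pvLoop (PvTask.sortT (seg.take mid) :: PvTask.sortT (seg.drop mid) ::
                PvTask.mergeT :: work) vals steps
  | PvTask.mergeT :: work, right :: left :: vals, steps =>
      let merged := pvMergeB left right
      pvLoop work (merged :: vals) (steps ++ [merged])
  | PvTask.mergeT :: _, _, steps => steps   -- unreachable: the machine keeps two values below every merge task
termination_by (work.map pvTaskWeight).sum
decreasing_by
  · simp [pvTaskWeight]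
  · rename_i h
    simp only [List.map_cons, List.sum_cons, pvTaskWeight, List.length_take, List.length_drop]
    have hmin : min (seg.length / 2) seg.length = seg.length / 2 := by omega
    rw [hmin]
    have hc := pvCubeSplit (seg.length / 2) (seg.length - seg.length / 2) (by omega) (by omega)
    have hsum : seg.length / 2 + (seg.length - seg.length / 2) = seg.length := by omega
    rw [hsum] at hc
    linarith
  · simp [pvTaskWeight]

def mezcla_equilibrada_sort_alt (arr : List Int) : List (List Int) :=
  pvLoop [PvTask.sortT arr] [] []

-- ===== PRECONDITION & SPEC =====
def Spec_mezcla_equilibrada_sort (arr : List Int) (out : List (List Int)) : Prop := out = mezcla_equilibrada_sort_alt arr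
instance (arr : List Int) (out : List (List Int)) : Decidable (Spec_mezcla_equilibrada_sort arr out) := by unfold Spec_mezcla_equilibrada_sort; infer_instance

-- ===== CLAIM (what is proved, stated in full; the proofs are below) =====
def Claim_equal_mezcla_equilibrada_sort : Prop := ∀ (arr : List Int), Dom_mezcla_equilibrada_sort arr → Spec_mezcla_equilibrada_sort arr (mezcla_equilibrada_sort arr)

-- ===== LEMMAS AND PROOFS =====
theorem pvMerge_eq : ∀ (l r : List Int), pvMergeB l r = pvMergeA l r := by
  intro l r
  fun_induction pvMergeB l r <;> simp_all [pvMergeA]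

-- the machine invariant: running a 'sort seg' task sorts seg onto the value stack
-- and emits exactly the steps the recursive A emits for seg, then continues.
theorem pvLoop_sort (n : Nat) : ∀ (seg : List Int), seg.length ≤ n →
    ∀ (work : List PvTask) (vals steps : List (List Int)),
    pvLoop (PvTask.sortT seg :: work) vals steps
      = pvLoop work ((pvMsortA seg).1 :: vals) (steps ++ (pvMsortA seg).2) := by
  induction n with
  | zero =>
    intro seg hlen work vals steps
    have : seg = [] := List.length_eq_zero_iff.mp (Nat.le_zero.mp hlen)
    subst this
    simp [pvLoop, pvMsortA]
  | succ n ih =>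
    intro seg hlen work vals steps
    by_cases hs : seg.length ≤ 1
    · rw [pvLoop, if_pos hs, pvMsortA, if_pos hs]
      simp
    · rw [pvLoop, if_neg hs]
      have hmid : seg.length / 2 ≤ n := by omega
      have hdrop : (seg.drop (seg.length / 2)).length ≤ n := by simp; omega
      have htake : (seg.take (seg.length / 2)).length ≤ n := by simp; omega
      rw [ih _ htake, ih _ hdrop]
      rw [pvLoop]
      have hms : pvMsortA seg
          = (pvMergeA (pvMsortA (seg.take (seg.length / 2))).1 (pvMsortA (seg.drop (seg.length / 2))).1,
             (pvMsortA (seg.take (seg.length / 2))).2 ++ (pvMsortA (seg.drop (seg.length / 2))).2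
               ++ [pvMergeA (pvMsortA (seg.take (seg.length / 2))).1 (pvMsortA (seg.drop (seg.length / 2))).1]) := by
        rw [pvMsortA, if_neg hs]
      rw [hms, pvMerge_eq]
      simp

theorem mezcla_alt_eq (arr : List Int) :
    mezcla_equilibrada_sort_alt arr = mezcla_equilibrada_sort arr := by
  unfold mezcla_equilibrada_sort_alt mezcla_equilibrada_sort
  rw [pvLoop_sort arr.length arr le_rfl]
  simp [pvLoop]

-- ===== VERDICT (by name: the statement is the Claim_ definition above) =====
theorem mezcla_equilibrada_sort_spec : Claim_equal_mezcla_equilibrada_sort := by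
  intro arr _
  unfold Spec_mezcla_equilibrada_sort
  exact (mezcla_alt_eq arr).symm
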